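-- pv_equiv track=rewrite | github.com/agragland/comb-test-library | comb_testing/biased_algorithm.py | calc_candidate_benefit
-- ===== SOURCE A (Python) =====
-- import itertools
--
-- def calc_candidate_benefit(tuples, candidate):
--     can_benefit = 0
--     tuple_count = 0
--     pairs = list(itertools.combinations(candidate, 2))
--     for pair in pairs:
--         for tup in list(tuples.items()):
--             if tup[0] == pair:
--                 can_benefit += tup[1]
--                 tuple_count += 1
--
--     return can_benefit, tuple_count
-- ===== SOURCE B (Python) =====
-- import itertools
--
-- def calc_candidate_benefit(tuples, candidate):
--     # Count each candidate pair once, then make a single pass over tuples.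
--     cnt = {}
--     for pair in itertools.combinations(candidate, 2):
--         cnt[pair] = cnt.get(pair, 0) + 1
--     can_benefit = 0
--     tuple_count = 0
--     for key, value in tuples.items():
--         c = cnt.get(key, 0)
--         can_benefit += value * c
--         tuple_count += c
--     return can_benefit, tuple_count
-- ===== Notes on version B (the rewrite author's own statement) =====
-- stated objective: faster
-- what changed: Instead of scanning all tuples once per candidate pair (nested loops), B builds a dict of pair multiplicities from combinations(candidate,2) once and then makes a single pass over tuples.items(), adding value*count and count; intended as faster (removes the k^2*n term; measured ~8x at n=1024, though both remain quadratic in the candidate length from generating the pairs).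
import Mathlib
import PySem

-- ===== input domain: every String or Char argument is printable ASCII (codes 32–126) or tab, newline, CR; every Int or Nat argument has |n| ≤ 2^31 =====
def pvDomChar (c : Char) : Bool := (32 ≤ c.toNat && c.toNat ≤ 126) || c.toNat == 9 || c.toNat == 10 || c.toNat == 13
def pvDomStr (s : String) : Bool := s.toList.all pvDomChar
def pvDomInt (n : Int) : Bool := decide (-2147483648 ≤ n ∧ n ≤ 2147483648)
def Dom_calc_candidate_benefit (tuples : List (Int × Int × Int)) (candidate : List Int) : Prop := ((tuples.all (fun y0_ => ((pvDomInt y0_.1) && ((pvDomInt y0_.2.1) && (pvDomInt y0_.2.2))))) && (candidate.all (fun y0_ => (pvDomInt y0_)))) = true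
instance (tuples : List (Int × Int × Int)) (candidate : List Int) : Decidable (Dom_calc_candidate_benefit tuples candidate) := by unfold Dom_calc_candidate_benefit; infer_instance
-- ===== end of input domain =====

-- B replaces A's pair-by-pair scan of all tuples with a pair-multiplicity dict built once
-- and a single pass over tuples; intended as faster (measured ~8x at n=1024).

-- itertools.combinations(candidate, 2), in order
def pvComb2 (xs : List Int) : List (Int × Int) :=
  match xs with
  | [] => []
  | x :: rest => rest.map (fun y => (x, y)) ++ pvComb2 rest

-- ===== PORT A =====
def calc_candidate_benefit (tuples : List (Int × Int × Int)) (candidate : List Int) : Int × Int :=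
  let pairs := pvComb2 candidate
  pairs.foldl (fun acc pair =>
    tuples.foldl (fun acc2 tup =>
      if (tup.1, tup.2.1) = pair then (acc2.1 + tup.2.2, acc2.2 + 1) else acc2) acc) (0, 0)

-- ===== PORT B =====
def calc_candidate_benefit_alt (tuples : List (Int × Int × Int)) (candidate : List Int) : Int × Int :=
  let cnt : PySem.Dict (Int × Int) Int :=
    (pvComb2 candidate).foldl (fun d p => d.insert p (d.getD p 0 + 1)) PySem.Dict.empty
  tuples.foldl (fun acc t =>
    let c := cnt.getD (t.1, t.2.1) 0
    (acc.1 + t.2.2 * c, acc.2 + c)) (0, 0)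

-- ===== PRECONDITION & SPEC =====
def Spec_calc_candidate_benefit (tuples : List (Int × Int × Int)) (candidate : List Int) (out : Int × Int) : Prop := out = calc_candidate_benefit_alt tuples candidate
instance (tuples : List (Int × Int × Int)) (candidate : List Int) (out : Int × Int) : Decidable (Spec_calc_candidate_benefit tuples candidate out) := by unfold Spec_calc_candidate_benefit; infer_instance

-- ===== CLAIM (what is proved, stated in full; the proofs are below) =====
def Claim_equal_calc_candidate_benefit : Prop := ∀ (tuples : List (Int × Int × Int)) (candidate : List Int), Dom_calc_candidate_benefit tuples candidate → Spec_calc_candidate_benefit tuples candidate (calc_candidate_benefit tuples candidate)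

-- ===== LEMMAS AND PROOFS =====

-- benefit contributed by one pair over all tuples
def pvB1 (tuples : List (Int × Int × Int)) (pair : Int × Int) : Int :=
  (tuples.map (fun t => if (t.1, t.2.1) = pair then t.2.2 else 0)).sum

-- count of tuples matching one pair
def pvC1 (tuples : List (Int × Int × Int)) (pair : Int × Int) : Int :=
  (tuples.map (fun t => if (t.1, t.2.1) = pair then (1 : Int) else 0)).sum

theorem pv_innerA (tuples : List (Int × Int × Int)) (pair : Int × Int) (acc : Int × Int) :
    tuples.foldl (fun acc2 tup =>
      if (tup.1, tup.2.1) = pair then (acc2.1 + tup.2.2, acc2.2 + 1) else acc2) acc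
    = (acc.1 + pvB1 tuples pair, acc.2 + pvC1 tuples pair) := by
  induction tuples generalizing acc with
  | nil => simp [pvB1, pvC1]
  | cons t ts ih =>
    by_cases h : (t.1, t.2.1) = pair <;>
      simp only [List.foldl_cons, h, if_pos, if_neg, ih, pvB1, pvC1, List.map_cons,
        List.sum_cons, Prod.mk.injEq, not_false_iff] <;>
      constructor <;> ring

theorem pv_outerA (tuples : List (Int × Int × Int)) (pairs : List (Int × Int)) (acc : Int × Int) :
    pairs.foldl (fun acc pair =>
      tuples.foldl (fun acc2 tup =>
        if (tup.1, tup.2.1) = pair then (acc2.1 + tup.2.2, acc2.2 + 1) else acc2) acc) acc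
    = (acc.1 + (pairs.map (pvB1 tuples)).sum, acc.2 + (pairs.map (pvC1 tuples)).sum) := by
  induction pairs generalizing acc with
  | nil => simp
  | cons p ps ih =>
    rw [List.foldl_cons, pv_innerA, ih]
    simp only [List.map_cons, List.sum_cons, Prod.mk.injEq]
    constructor <;> ring

theorem pv_sideB (c : (Int × Int) → Int) (tuples : List (Int × Int × Int)) (acc : Int × Int) :
    tuples.foldl (fun acc t =>
      (acc.1 + t.2.2 * c (t.1, t.2.1), acc.2 + c (t.1, t.2.1))) acc
    = (acc.1 + (tuples.map (fun t => t.2.2 * c (t.1, t.2.1))).sum,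
       acc.2 + (tuples.map (fun t => c (t.1, t.2.1))).sum) := by
  induction tuples generalizing acc with
  | nil => simp
  | cons t ts ih =>
    simp only [List.foldl_cons, ih, List.map_cons, List.sum_cons, Prod.mk.injEq]
    constructor <;> ring

theorem pv_exchangeB (tuples : List (Int × Int × Int)) (pairs : List (Int × Int)) :
    (pairs.map (pvB1 tuples)).sum
    = (tuples.map (fun t => t.2.2 * ((pairs.count (t.1, t.2.1) : Int)))).sum := by
  induction pairs with
  | nil => simp
  | cons p ps ih =>
    simp only [List.map_cons, List.sum_cons, ih, List.count_cons]
    rw [pvB1, ← List.sum_map_add]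
    refine congrArg List.sum (List.map_congr_left (fun t _ => ?_))
    push_cast
    by_cases h : (t.1, t.2.1) = p
    · simp [h]; ring
    · simp [h, Ne.symm h]

theorem pv_exchangeC (tuples : List (Int × Int × Int)) (pairs : List (Int × Int)) :
    (pairs.map (pvC1 tuples)).sum
    = (tuples.map (fun t => ((pairs.count (t.1, t.2.1) : Int)))).sum := by
  induction pairs with
  | nil => simp
  | cons p ps ih =>
    simp only [List.map_cons, List.sum_cons, ih, List.count_cons]
    rw [pvC1, ← List.sum_map_add]
    refine congrArg List.sum (List.map_congr_left (fun t _ => ?_))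
    push_cast
    by_cases h : (t.1, t.2.1) = p
    · simp [h]; ring
    · simp [h, Ne.symm h]

theorem pv_counter (candidate : List Int) (k : Int × Int) :
    ((pvComb2 candidate).foldl (fun d p => d.insert p (d.getD p 0 + 1))
        (PySem.Dict.empty : PySem.Dict (Int × Int) Int)).getD k 0
    = ((pvComb2 candidate).count k : Int) := by
  rw [PySem.Dict.getD_foldl_insert_add_one]
  simp [PySem.Dict.getD_empty]

-- ===== VERDICT (by name: the statement is the Claim_ definition above) =====
theorem calc_candidate_benefit_spec : Claim_equal_calc_candidate_benefit := by
  intro tuples candidate _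
  unfold Spec_calc_candidate_benefit calc_candidate_benefit calc_candidate_benefit_alt
  simp only [pv_outerA]
  have := pv_sideB (fun k => ((pvComb2 candidate).count k : Int)) tuples (0, 0)
  simp only [pv_counter]
  rw [this, pv_exchangeB, pv_exchangeC]
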